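-- pv_equiv track=rewrite | github.com/ToucanToco/weaverbird | server/src/weaverbird/backends/mongo_translator/steps/fromdate.py | _order_date_tag_from_format
-- ===== SOURCE A (Python) =====
-- _DATE_TAGS = ["%d", "%b", "%B", "%Y"]
--
-- def _order_date_tag_from_format(date_format: str) -> list[tuple[int, str]]:
--     """Extracts date tag position from date format"""
--     ordered_tag_pos: list[tuple[int, str]] = []
--     for tag in _DATE_TAGS:
--         try:
--             ordered_tag_pos.append((date_format.index(tag), tag))
--         except ValueError:
--             continue
--     return sorted(ordered_tag_pos)
-- ===== SOURCE B (Python) =====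
-- _DATE_TAGS = ["%d", "%b", "%B", "%Y"]
--
--
-- def _order_date_tag_from_format(date_format: str) -> list[tuple[int, str]]:
--     """Extracts date tag position from date format (single left-to-right scan)"""
--     out: list[tuple[int, str]] = []
--     seen: set[str] = set()
--     for i in range(len(date_format)):
--         tag = date_format[i : i + 2]
--         if tag in _DATE_TAGS and tag not in seen:
--             out.append((i, tag))
--             seen.add(tag)
--     return out
-- ===== Notes on version B (the rewrite author's own statement) =====
-- stated objective: alternative
-- what changed: Replaces the four per-tag str.index scans followed by sorted() with a single left-to-right scan that checks the 2-character slice at each position against the tag list and a seen-set, emitting first occurrences already in ascending position order so no sort is needed.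
import Mathlib
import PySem

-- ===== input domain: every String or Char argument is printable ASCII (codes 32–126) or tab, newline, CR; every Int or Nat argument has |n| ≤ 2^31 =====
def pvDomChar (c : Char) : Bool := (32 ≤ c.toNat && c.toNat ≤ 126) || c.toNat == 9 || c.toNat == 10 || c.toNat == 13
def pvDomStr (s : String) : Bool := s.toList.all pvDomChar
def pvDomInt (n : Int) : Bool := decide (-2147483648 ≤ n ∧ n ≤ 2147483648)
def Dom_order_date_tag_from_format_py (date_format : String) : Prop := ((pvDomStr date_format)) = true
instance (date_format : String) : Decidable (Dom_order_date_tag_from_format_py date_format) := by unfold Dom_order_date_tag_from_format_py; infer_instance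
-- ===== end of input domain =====

-- B replaces A's four str.index searches plus a sort by one left-to-right scan with a seen-set
-- (positions come out already ascending); same return value, alternative algorithm.


-- ===== PORT A =====
-- _DATE_TAGS = ["%d", "%b", "%B", "%Y"]  (module constant, shared by both ports)
def pvDateTags : List String := ["%d", "%b", "%B", "%Y"]

-- A: for each tag, date_format.index(tag) (ValueError ⇔ find = -1 → continue), then sorted(...)
def order_date_tag_from_format_py (date_format : String) : List (Int × String) :=
  let ordered_tag_pos : List (Int × String) :=
    pvDateTags.foldl (fun acc tag =>
      let idx := PySem.Str.find date_format tag
      if idx = -1 then acc else acc ++ [(idx, tag)]) []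
  PySem.List.sorted2 ordered_tag_pos Prod.fst Prod.snd

-- ===== PORT B =====
-- B: one scan; at position i (remaining chars c :: rest) the slice date_format[i:i+2]
-- is String.ofList (take 2 (c :: rest)) — exact, since the remaining list is drop i.
def pvAltGo : List Char → Nat → PySem.Set String → List (Int × String) → List (Int × String)
  | [], _, _, out => out
  | c :: rest, i, seen, out =>
    let tag := String.ofList (List.take 2 (c :: rest))
    if tag ∈ pvDateTags ∧ tag ∉ seen then
      pvAltGo rest (i + 1) (PySem.Set.add seen tag) (out ++ [((i : Int), tag)])
    else
      pvAltGo rest (i + 1) seen out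

def order_date_tag_from_format_py_alt (date_format : String) : List (Int × String) :=
  pvAltGo date_format.toList 0 PySem.Set.empty []

-- ===== PRECONDITION & SPEC =====
def Spec_order_date_tag_from_format_py (date_format : String) (out : List (Int × String)) : Prop := out = order_date_tag_from_format_py_alt date_format
instance (date_format : String) (out : List (Int × String)) : Decidable (Spec_order_date_tag_from_format_py date_format out) := by unfold Spec_order_date_tag_from_format_py; infer_instance

-- ===== CLAIM (what is proved, stated in full; the proofs are below) =====
def Claim_equal_order_date_tag_from_format_py : Prop := ∀ (date_format : String), Dom_order_date_tag_from_format_py date_format → Spec_order_date_tag_from_format_py date_format (order_date_tag_from_format_py date_format)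

-- ===== LEMMAS AND PROOFS =====

-- accumulator-free form of B's scan
def pvScan : List Char → Nat → PySem.Set String → List (Int × String)
  | [], _, _ => []
  | c :: rest, i, seen =>
    if String.ofList (List.take 2 (c :: rest)) ∈ pvDateTags ∧
        String.ofList (List.take 2 (c :: rest)) ∉ seen then
      ((i : Int), String.ofList (List.take 2 (c :: rest)))
        :: pvScan rest (i + 1) (PySem.Set.add seen (String.ofList (List.take 2 (c :: rest))))
    else
      pvScan rest (i + 1) seen

theorem pvScan_cons (c : Char) (rest : List Char) (i : Nat) (seen : PySem.Set String) :
    pvScan (c :: rest) i seen =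
      if String.ofList (List.take 2 (c :: rest)) ∈ pvDateTags ∧
          String.ofList (List.take 2 (c :: rest)) ∉ seen then
        ((i : Int), String.ofList (List.take 2 (c :: rest)))
          :: pvScan rest (i + 1) (PySem.Set.add seen (String.ofList (List.take 2 (c :: rest))))
      else
        pvScan rest (i + 1) seen := rfl

theorem pvAltGo_eq (r : List Char) : ∀ (i : Nat) (seen : PySem.Set String) (out : List (Int × String)),
    pvAltGo r i seen out = out ++ pvScan r i seen := by
  induction r with
  | nil => intro i seen out; simp [pvAltGo, pvScan]
  | cons c rest ih =>
    intro i seen out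
    simp only [pvAltGo, pvScan]
    split
    · rw [ih]; simp
    · rw [ih]

-- the (position, tag) entries, in TAG order, of the tags of ts not in S that occur in r
def pvM (ts : List String) (r : List Char) (i : Nat) (S : List String) : List (Int × String) :=
  (ts.filter (fun t => decide (t ∉ S) && decide (PySem.Chars.find r t.toList ≠ -1))).map
    (fun t => (((i : Int) + PySem.Chars.find r t.toList), t))

theorem pvM_cons (t : String) (ts : List String) (r : List Char) (i : Nat) (S : List String) :
    pvM (t :: ts) r i S =
      (if t ∉ S ∧ PySem.Chars.find r t.toList ≠ -1
        then [(((i : Int) + PySem.Chars.find r t.toList), t)] else []) ++ pvM ts r i S := by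
  by_cases h : t ∉ S ∧ PySem.Chars.find r t.toList ≠ -1
  · simp [pvM, h.1, h.2]
  · rw [if_neg h]
    rcases not_and_or.mp h with h' | h'
    · simp only [not_not] at h'
      simp [pvM, h']
    · simp only [not_not] at h'
      simp [pvM, h']

-- find points at the first occurrence: uniqueness
theorem pvFind_eq_of_first {t r : List Char} {j : Nat}
    (h1 : t <+: r.drop j) (h2 : ∀ i < j, ¬ t <+: r.drop i) :
    PySem.Chars.find r t = (j : Int) := by
  have hinf : t <:+: r := h1.isInfix.trans (List.drop_suffix j r).isInfix
  have hnn : 0 ≤ PySem.Chars.find r t := (PySem.Chars.find_nonneg_iff r t).mpr hinf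
  obtain ⟨hp, hmin⟩ := PySem.Chars.find_spec hnn
  have : (PySem.Chars.find r t).toNat = j := by
    rcases Nat.lt_trichotomy (PySem.Chars.find r t).toNat j with h | h | h
    · exact absurd hp (h2 _ h)
    · exact h
    · exact absurd h1 (hmin j h)
  omega

theorem pvFind_of_prefix {t r : List Char} (h : t <+: r) : PySem.Chars.find r t = 0 :=
  pvFind_eq_of_first (by simpa using h) (fun i hi => absurd hi (Nat.not_lt_zero i))

theorem pvFind_cons_shift {t : List Char} {c : Char} {r : List Char} (h : ¬ t <+: (c :: r)) :
    PySem.Chars.find (c :: r) t =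
      if PySem.Chars.find r t = -1 then -1 else PySem.Chars.find r t + 1 := by
  by_cases hinf : t <:+: r
  · have hnn : 0 ≤ PySem.Chars.find r t := (PySem.Chars.find_nonneg_iff r t).mpr hinf
    obtain ⟨hp, hmin⟩ := PySem.Chars.find_spec hnn
    have hne : PySem.Chars.find r t ≠ -1 := by omega
    rw [if_neg hne]
    have hj : PySem.Chars.find (c :: r) t = (((PySem.Chars.find r t).toNat + 1 : Nat) : Int) := by
      apply pvFind_eq_of_first
      · simpa using hp
      · intro i hi
        match i with
        | 0 => simpa using h
        | (k+1) => exact hmin k (by omega)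
    rw [hj]; omega
  · have h1 : PySem.Chars.find r t = -1 := (PySem.Chars.find_eq_neg_one_iff r t).mpr hinf
    have h2 : ¬ t <:+: (c :: r) := by
      rw [List.infix_cons_iff]; exact not_or.mpr ⟨h, hinf⟩
    rw [if_pos h1]
    exact (PySem.Chars.find_eq_neg_one_iff _ t).mpr h2

-- per-character step lemmas on pvM
theorem pvM_shift (r : List Char) (i : Nat) (c : Char) (S S' : List String) :
    ∀ ts : List String, (∀ t ∈ ts, ¬ t.toList <+: (c :: r) ∧ (t ∈ S ↔ t ∈ S')) →
      pvM ts (c :: r) i S = pvM ts r (i + 1) S' := by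
  intro ts
  induction ts with
  | nil => intro _; simp [pvM]
  | cons t ts ih =>
    intro h
    obtain ⟨hnp, hSS⟩ := h t (by simp)
    rw [pvM_cons, pvM_cons, ih (fun u hu => h u (by simp [hu]))]
    rw [pvFind_cons_shift hnp]
    by_cases hf : PySem.Chars.find r t.toList = -1
    · simp [hf]
    · have hlb := PySem.Chars.neg_one_le_find r t.toList
      split_ifs with h1 h2 h2 <;> simp_all [Prod.ext_iff] <;> omega

theorem pvM_skip (r : List Char) (i : Nat) (c : Char) (S : List String) (t0 : String)
    (h0 : t0 ∈ S) :
    ∀ ts : List String, (∀ t ∈ ts, t.toList <+: (c :: r) → t = t0) →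
      pvM ts (c :: r) i S = pvM ts r (i + 1) S := by
  intro ts
  induction ts with
  | nil => intro _; simp [pvM]
  | cons t ts ih =>
    intro h
    rw [pvM_cons, pvM_cons, ih (fun u hu => h u (by simp [hu]))]
    by_cases hp : t.toList <+: (c :: r)
    · have ht : t = t0 := h t (by simp) hp
      subst ht
      rw [if_neg (by simp [h0]), if_neg (by simp [h0])]
    · rw [pvFind_cons_shift hp]
      by_cases hf : PySem.Chars.find r t.toList = -1
      · simp [hf]
      · have hlb := PySem.Chars.neg_one_le_find r t.toList
        split_ifs with h1 h2 h2 <;> simp_all [Prod.ext_iff] <;> omega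

theorem pvM_hit (r : List Char) (i : Nat) (c : Char) (S : List String) (t0 : String)
    (h0 : t0 ∉ S) (hpre : t0.toList <+: (c :: r)) :
    ∀ ts : List String, ts.Nodup → t0 ∈ ts → (∀ t ∈ ts, t.toList <+: (c :: r) → t = t0) →
      (pvM ts (c :: r) i S).Perm (((i : Int), t0) :: pvM ts r (i + 1) (S ++ [t0])) := by
  intro ts
  induction ts with
  | nil => intro _ h; simp at h
  | cons t ts ih =>
    intro hnd hmem huniq
    by_cases ht : t = t0
    · subst ht
      have hts : t ∉ ts := by simp at hnd; exact hnd.1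
      rw [pvM_cons, pvM_cons]
      rw [if_pos ⟨h0, by rw [pvFind_of_prefix hpre]; omega⟩]
      rw [if_neg (by simp)]
      rw [pvFind_of_prefix hpre]
      have heq : pvM ts (c :: r) i S = pvM ts r (i + 1) (S ++ [t]) := by
        apply pvM_shift
        intro u hu
        have hut : u ≠ t := fun h => hts (h ▸ hu)
        exact ⟨fun hp => hut (huniq u (by simp [hu]) hp), by simp [hut]⟩
      rw [heq]
      simp
    · have hmem' : t0 ∈ ts := by
        cases hmem with
        | head => exact absurd rfl ht
        | tail _ h => exact h
      have hnp : ¬ t.toList <+: (c :: r) := fun hp => ht (huniq t (by simp) hp)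
      have ihp := ih (List.Nodup.of_cons hnd) hmem' (fun u hu => huniq u (by simp [hu]))
      rw [pvM_cons, pvM_cons]
      have hE : (if t ∉ S ∧ PySem.Chars.find (c :: r) t.toList ≠ -1
            then [(((i : Int) + PySem.Chars.find (c :: r) t.toList), t)] else [])
          = (if t ∉ S ++ [t0] ∧ PySem.Chars.find r t.toList ≠ -1
            then [((((i + 1 : Nat) : Int) + PySem.Chars.find r t.toList), t)] else []) := by
        have hmem : t ∉ S ++ [t0] ↔ t ∉ S := by simp [ht]
        rw [pvFind_cons_shift hnp]
        by_cases hf : PySem.Chars.find r t.toList = -1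
        · simp [hf]
        · rw [if_neg hf]
          by_cases hs : t ∈ S
          · rw [if_neg (by simp [hs]), if_neg (by simp [hs])]
          · rw [if_pos ⟨hs, by have := PySem.Chars.neg_one_le_find r t.toList; omega⟩,
                if_pos ⟨hmem.mpr hs, hf⟩]
            have hv : (i : Int) + (PySem.Chars.find r t.toList + 1)
                = ((i + 1 : Nat) : Int) + PySem.Chars.find r t.toList := by push_cast; omega
            rw [hv]
      rw [hE]
      exact (ihp.append_left _).trans List.perm_middle

-- each date tag has a two-character toList
theorem pvTag_two {t : String} (h : t ∈ pvDateTags) : t.toList.length = 2 := by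
  fin_cases h <;> decide

-- a prefix tag is determined by the first two characters
theorem pvTag_uniq {t : String} {c : Char} {r : List Char} (h : t ∈ pvDateTags)
    (hp : t.toList <+: (c :: r)) : t = String.ofList (List.take 2 (c :: r)) := by
  have h2 := pvTag_two h
  have := List.prefix_iff_eq_take.mp hp
  rw [h2] at this
  have : String.ofList t.toList = String.ofList (List.take 2 (c :: r)) := by rw [← this]
  simpa using this

-- B's scan is a permutation of the tag-ordered entry list
theorem pvScan_perm_pvM (r : List Char) : ∀ (i : Nat) (S : List String),
    (pvScan r i S).Perm (pvM pvDateTags r i S) := by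
  induction r with
  | nil =>
    intro i S
    have : pvM pvDateTags [] i S = [] := by
      have hf : ∀ t ∈ pvDateTags, PySem.Chars.find [] t.toList = -1 := by
        intro t ht
        rw [PySem.Chars.find_eq_neg_one_iff]
        intro hinf
        have := List.infix_nil.mp hinf
        have h2 := pvTag_two ht
        simp [this] at h2
      simp only [pvM]
      rw [List.filter_eq_nil_iff.mpr ?_]
      · simp
      · intro t ht
        simp [hf t ht]
    rw [this]
    exact List.Perm.refl _
  | cons c rest ih =>
    intro i S
    simp only [pvScan]
    by_cases hcond : String.ofList (List.take 2 (c :: rest)) ∈ pvDateTags ∧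
        String.ofList (List.take 2 (c :: rest)) ∉ S
    · rw [if_pos hcond]
      obtain ⟨htag, hnotS⟩ := hcond
      have hpre : (String.ofList (List.take 2 (c :: rest))).toList <+: (c :: rest) := by
        have : (String.ofList (List.take 2 (c :: rest))).toList = List.take 2 (c :: rest) := by simp
        rw [this]; exact List.take_prefix 2 (c :: rest)
      have hadd : PySem.Set.add S (String.ofList (List.take 2 (c :: rest)))
          = S ++ [String.ofList (List.take 2 (c :: rest))] :=
        PySem.Set.add_of_not_mem hnotS
      have hperm := pvM_hit rest i c S _ hnotS hpre pvDateTags (by decide) htag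
        (fun t htm hp => pvTag_uniq htm hp)
      rw [hadd]
      exact (List.Perm.cons _ (ih (i + 1) _)).trans hperm.symm
    · rw [if_neg hcond]
      by_cases htag : String.ofList (List.take 2 (c :: rest)) ∈ pvDateTags
      · have hS : String.ofList (List.take 2 (c :: rest)) ∈ S := by
          by_contra hn; exact hcond ⟨htag, hn⟩
        have heq := pvM_skip rest i c S _ hS pvDateTags (fun t htm hp => pvTag_uniq htm hp)
        rw [heq]
        exact ih (i + 1) S
      · have heq : pvM pvDateTags (c :: rest) i S = pvM pvDateTags rest (i + 1) S := by
          apply pvM_shift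
          intro t htm
          refine ⟨?_, Iff.rfl⟩
          intro hp
          exact htag (by rw [← pvTag_uniq htm hp]; exact htm)
        rw [heq]
        exact ih (i + 1) S

-- positions produced by the scan are ≥ the running index, hence strictly increasing
theorem pvScan_lb (r : List Char) : ∀ (i : Nat) (S : PySem.Set String),
    ∀ p ∈ pvScan r i S, (i : Int) ≤ p.1 := by
  induction r with
  | nil => intro i S p hp; simp [pvScan] at hp
  | cons c rest ih =>
    intro i S p hp
    by_cases hcond : String.ofList (List.take 2 (c :: rest)) ∈ pvDateTags ∧
        String.ofList (List.take 2 (c :: rest)) ∉ S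
    · rw [pvScan_cons, if_pos hcond] at hp
      rcases List.mem_cons.mp hp with hp | hp
      · simp [hp]
      · have := ih (i + 1) _ p hp; push_cast at this ⊢; omega
    · rw [pvScan_cons, if_neg hcond] at hp
      have := ih (i + 1) _ p hp; push_cast at this ⊢; omega

theorem pvScan_pairwise (r : List Char) : ∀ (i : Nat) (S : PySem.Set String),
    (pvScan r i S).Pairwise (fun a b => a.1 < b.1) := by
  induction r with
  | nil => intro i S; simp [pvScan]
  | cons c rest ih =>
    intro i S
    by_cases hcond : String.ofList (List.take 2 (c :: rest)) ∈ pvDateTags ∧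
        String.ofList (List.take 2 (c :: rest)) ∉ S
    · rw [pvScan_cons, if_pos hcond]
      refine List.Pairwise.cons ?_ (ih (i + 1) _)
      intro b hb
      have := pvScan_lb rest (i + 1) _ b hb
      push_cast at this ⊢; omega
    · rw [pvScan_cons, if_neg hcond]
      exact ih (i + 1) S

-- A's internal list is exactly pvM over the full tag list with nothing seen
theorem pvL_eq (s : String) :
    pvDateTags.foldl (fun acc tag =>
        let idx := PySem.Str.find s tag
        if idx = -1 then acc else acc ++ [(idx, tag)]) []
      = pvM pvDateTags s.toList 0 [] := by
  simp only [pvDateTags, pvM, List.foldl, List.filter, PySem.Str.find_eq]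
  split_ifs <;> simp_all

-- insertion with two pointwise-agreeing relations is identical
theorem pvInsertBy_congr {α : Type} (b1 b2 : α → α → Bool) (x : α) :
    ∀ acc : List α, (∀ a ∈ acc, b1 x a = b2 x a) →
      PySem.List.insertBy b1 x acc = PySem.List.insertBy b2 x acc := by
  intro acc
  induction acc with
  | nil => intro _; rfl
  | cons y ys ih =>
    intro h
    simp only [PySem.List.insertBy]
    rw [h y (by simp)]
    split
    · rfl
    · rw [ih (fun a ha => h a (by simp [ha]))]

theorem pvFoldl_insertBy_congr {α : Type} (b1 b2 : α → α → Bool) :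
    ∀ (xs acc : List α), (∀ x ∈ xs, ∀ a, (a ∈ acc ∨ a ∈ xs) → b1 x a = b2 x a) →
      xs.foldl (fun acc x => PySem.List.insertBy b1 x acc) acc
        = xs.foldl (fun acc x => PySem.List.insertBy b2 x acc) acc := by
  intro xs
  induction xs with
  | nil => intro acc _; rfl
  | cons x xs ih =>
    intro acc h
    simp only [List.foldl]
    rw [pvInsertBy_congr b1 b2 x acc (fun a ha => h x (by simp) a (Or.inl ha))]
    apply ih
    intro y hy a ha
    rcases ha with ha | ha
    · rcases (PySem.List.insertBy_mem_iff b2 x a acc).mp ha with ha | ha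
      · exact h y (by simp [hy]) a (Or.inr (by simp [ha]))
      · exact h y (by simp [hy]) a (Or.inl ha)
    · exact h y (by simp [hy]) a (Or.inr (by simp [ha]))

-- Python's tuple sort coincides with sorting by the first component when those are all distinct
theorem pvSorted2_eq_sorted_fst (xs : List (Int × String))
    (h : xs.Pairwise (fun a b => a.1 ≠ b.1)) :
    PySem.List.sorted2 xs Prod.fst Prod.snd = PySem.List.sorted xs Prod.fst := by
  rw [PySem.List.sorted_eq_foldl_insertBy]
  show xs.foldl (fun acc x => PySem.List.insertBy
      (fun a b => decide (a.1 < b.1) || (!decide (b.1 < a.1) && decide (a.2 < b.2))) x acc) []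
    = _
  apply pvFoldl_insertBy_congr
  intro x hx a ha
  rcases ha with ha | ha
  · simp at ha
  · by_cases hxa : x = a
    · subst hxa; simp
    · have hne : x.1 ≠ a.1 :=
        List.Pairwise.forall (fun {u v} huv => (huv ∘ Eq.symm : v.1 ≠ u.1)) h hx ha hxa
      rcases lt_trichotomy x.1 a.1 with hlt | heq | hgt
      · simp [hlt]
      · exact absurd heq hne
      · simp [hgt, not_lt_of_gt hgt]

-- ===== VERDICT (by name: the statement is the Claim_ definition above) =====
theorem order_date_tag_from_format_py_spec : Claim_equal_order_date_tag_from_format_py := by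
  intro s _
  show order_date_tag_from_format_py s = order_date_tag_from_format_py_alt s
  have hperm : (pvScan s.toList 0 []).Perm (pvM pvDateTags s.toList 0 []) :=
    pvScan_perm_pvM s.toList 0 []
  have hpw : (pvScan s.toList 0 []).Pairwise (fun a b : Int × String => a.1 < b.1) :=
    pvScan_pairwise s.toList 0 []
  have hL : order_date_tag_from_format_py s
      = PySem.List.sorted2 (pvM pvDateTags s.toList 0 []) Prod.fst Prod.snd := by
    simp only [order_date_tag_from_format_py]
    rw [pvL_eq s]
  have hpwM : (pvM pvDateTags s.toList 0 []).Pairwise (fun a b : Int × String => a.1 ≠ b.1) := by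
    have hsymm : ∀ {x y : Int × String}, x.1 ≠ y.1 → y.1 ≠ x.1 := fun h => Ne.symm h
    exact (hperm.pairwise_iff hsymm).mp (hpw.imp (fun h => ne_of_lt h))
  rw [hL, pvSorted2_eq_sorted_fst _ hpwM,
      PySem.List.sorted_eq_of_perm_of_pairwise_lt _ _ Prod.fst hperm hpw]
  show pvScan s.toList 0 [] = order_date_tag_from_format_py_alt s
  rw [order_date_tag_from_format_py_alt, pvAltGo_eq]
  rfl
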